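-- pv_equiv track=rewrite | github.com/ModelCloud/GPTQModel | tests/models/test_multi_vs_single_gpu.py | _select_preferred_devices
-- ===== SOURCE A (Python) =====
-- from typing import Dict, Iterable, List, Tuple
--
-- def _select_preferred_devices(visible_devices: int) -> Tuple[int, int]:
--     primary = 6 if visible_devices > 6 else 0
--     secondary_preferences = [7, 1, 0]
--     secondary = None
--     for candidate in secondary_preferences:
--         if candidate >= visible_devices:
--             continue
--         if candidate == primary:
--             continue
--         secondary = candidate
--         break
--     if secondary is None:
--         raise RuntimeError("Could not determine a secondary CUDA device for regression test")
--     return primary, secondary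
-- ===== SOURCE B (Python) =====
-- def _select_preferred_devices(visible_devices):
--     if visible_devices >= 8:
--         return 6, 7
--     if visible_devices >= 2:
--         return (6 if visible_devices == 7 else 0), 1
--     raise RuntimeError("Could not determine a secondary CUDA device for regression test")
-- ===== Notes on version B (the rewrite author's own statement) =====
-- stated objective: simpler
-- what changed: Replaces the scan over the candidate list [7,1,0] with a closed-form branch on visible_devices (>=8 -> (6,7); >=2 -> (primary,1); else raise).
import Mathlib
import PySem

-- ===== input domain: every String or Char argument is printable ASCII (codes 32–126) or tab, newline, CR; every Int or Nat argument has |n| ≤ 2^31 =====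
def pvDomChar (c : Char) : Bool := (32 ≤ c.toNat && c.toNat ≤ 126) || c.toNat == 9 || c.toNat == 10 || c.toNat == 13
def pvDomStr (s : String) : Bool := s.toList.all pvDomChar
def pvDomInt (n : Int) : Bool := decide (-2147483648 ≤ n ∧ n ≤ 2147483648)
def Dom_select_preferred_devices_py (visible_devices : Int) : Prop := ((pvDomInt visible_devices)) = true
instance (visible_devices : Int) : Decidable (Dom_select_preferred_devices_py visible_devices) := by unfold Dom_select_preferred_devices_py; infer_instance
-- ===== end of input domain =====

-- B replaces A's scan over the candidate list [7,1,0] with a closed-form branch on visible_devices (objective: simpler).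

-- ===== PORT A =====
-- the for-loop with break: first candidate that is < visible_devices and ≠ primary
def pvFindSecondary (primary visible_devices : Int) : List Int → Option Int
  | [] => none
  | c :: rest =>
      if c ≥ visible_devices then pvFindSecondary primary visible_devices rest
      else if c = primary then pvFindSecondary primary visible_devices rest
      else some c

def select_preferred_devices_py (visible_devices : Int) : Int × Int :=
  let primary : Int := if visible_devices > 6 then 6 else 0
  match pvFindSecondary primary visible_devices [7, 1, 0] with
  | some s => (primary, s)
  | none => (0, 0)  -- unreachable inside Pre_: Python raises RuntimeError here

-- ===== PORT B =====
def select_preferred_devices_py_alt (visible_devices : Int) : Int × Int :=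
  if visible_devices ≥ 8 then (6, 7)
  else if visible_devices ≥ 2 then ((if visible_devices = 7 then 6 else 0), 1)
  else (0, 0)  -- unreachable inside Pre_: Python raises RuntimeError here

-- ===== PRECONDITION & SPEC =====
-- Pre_ excludes visible_devices ≤ 1, where the Python A raises RuntimeError.
def Pre_select_preferred_devices_py (visible_devices : Int) : Prop := 2 ≤ visible_devices
instance (visible_devices : Int) : Decidable (Pre_select_preferred_devices_py visible_devices) := by unfold Pre_select_preferred_devices_py; infer_instance
def pvWitness_select_preferred_devices_py : Int := 4

def Spec_select_preferred_devices_py (visible_devices : Int) (out : Int × Int) : Prop := out = select_preferred_devices_py_alt visible_devices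
instance (visible_devices : Int) (out : Int × Int) : Decidable (Spec_select_preferred_devices_py visible_devices out) := by unfold Spec_select_preferred_devices_py; infer_instance

-- ===== CLAIM (what is proved, stated in full; the proofs are below) =====
def Claim_equal_select_preferred_devices_py : Prop := ∀ (visible_devices : Int), Dom_select_preferred_devices_py visible_devices → Pre_select_preferred_devices_py visible_devices → Spec_select_preferred_devices_py visible_devices (select_preferred_devices_py visible_devices)

-- ===== LEMMAS AND PROOFS =====

-- ===== VERDICT (by name: the statement is the Claim_ definition above) =====
theorem select_preferred_devices_py_spec : Claim_equal_select_preferred_devices_py := by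
  intro v _ hpre
  unfold Pre_select_preferred_devices_py at hpre
  unfold Spec_select_preferred_devices_py select_preferred_devices_py select_preferred_devices_py_alt pvFindSecondary
  by_cases h8 : 8 ≤ v
  · simp [show ¬ (7:Int) ≥ v by omega, show v > 6 by omega, show v ≥ 8 by omega]
  · by_cases h7 : v = 7
    · subst h7; decide
    · simp [pvFindSecondary, show (7:Int) ≥ v by omega, show ¬ (1:Int) ≥ v by omega, show ¬ v > 6 by omega,
            show ¬ v ≥ 8 by omega, show 2 ≤ v by omega, show v ≠ 7 from h7]
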